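-- pv_equiv track=rewrite | github.com/QingyuFeng/dmpotswat | pyscripts/DMPOTUtil.py | determineFileLoopFlag
-- ===== SOURCE A (Python) =====
-- def determineFileLoopFlag(
--     parmFileExtLst,
--     subLvlFlExtLst,
--     hruLvlFlExtLst):
--
--     """
--     This function determines wheter the sub and hru level should be
--     started.
--     Input: list of file extentions in the parameter dataframe
--     Output: two flags, one for subarealevel and one for hru level.
--     """
--
--     flagSubLoop = 0
--     flagHruLoop = 0
--
--     for fExt in parmFileExtLst:
--         if fExt in subLvlFlExtLst:
--             flagSubLoop = 1
--             break
--
--     for fExt2 in parmFileExtLst: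
--         if fExt2 in hruLvlFlExtLst:
--             flagHruLoop = 1
--             break
--
--     return flagSubLoop, flagHruLoop
-- ===== SOURCE B (Python) =====
-- def determineFileLoopFlag(
--     parmFileExtLst,
--     subLvlFlExtLst,
--     hruLvlFlExtLst):
--     # One pass over parmFileExtLst maintaining both flags; stop as soon as both are set.
--     flagSubLoop = 0
--     flagHruLoop = 0
--     for fExt in parmFileExtLst:
--         if flagSubLoop == 0 and fExt in subLvlFlExtLst:
--             flagSubLoop = 1
--         if flagHruLoop == 0 and fExt in hruLvlFlExtLst:
--             flagHruLoop = 1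
--         if flagSubLoop == 1 and flagHruLoop == 1:
--             break
--     return flagSubLoop, flagHruLoop
-- ===== Notes on version B (the rewrite author's own statement) =====
-- stated objective: alternative
-- what changed: Replaces A's two independent early-exit scans of parmFileExtLst with a single pass that maintains both flags at once and stops when both are set.
import Mathlib
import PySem

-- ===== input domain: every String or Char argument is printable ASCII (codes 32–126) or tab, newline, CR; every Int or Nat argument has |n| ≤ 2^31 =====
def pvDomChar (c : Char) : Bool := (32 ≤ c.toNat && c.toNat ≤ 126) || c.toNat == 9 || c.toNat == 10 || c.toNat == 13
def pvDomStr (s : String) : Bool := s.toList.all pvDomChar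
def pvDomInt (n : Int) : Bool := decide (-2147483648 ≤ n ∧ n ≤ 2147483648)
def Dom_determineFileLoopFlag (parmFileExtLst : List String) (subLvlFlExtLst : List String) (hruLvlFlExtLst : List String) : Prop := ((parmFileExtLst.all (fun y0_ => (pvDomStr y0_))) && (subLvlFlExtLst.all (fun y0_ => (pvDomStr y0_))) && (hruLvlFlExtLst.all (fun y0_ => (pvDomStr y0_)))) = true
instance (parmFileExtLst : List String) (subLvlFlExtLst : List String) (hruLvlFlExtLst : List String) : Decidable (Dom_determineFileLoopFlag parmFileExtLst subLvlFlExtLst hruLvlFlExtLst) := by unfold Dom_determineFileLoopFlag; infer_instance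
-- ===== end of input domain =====

-- B replaces A's two separate early-exit scans with one pass maintaining both flags (alternative decomposition, same cost).


-- ===== PORT A =====
-- A's first loop: scan parmFileExtLst, set flag to 1 and break on the first ext found in extLst.
def pvScanFlag (parm : List String) (extLst : List String) : Int :=
  match parm with
  | [] => 0
  | x :: rest => if extLst.contains x then 1 else pvScanFlag rest extLst

def determineFileLoopFlag (parmFileExtLst : List String) (subLvlFlExtLst : List String) (hruLvlFlExtLst : List String) : Int × Int :=
  (pvScanFlag parmFileExtLst subLvlFlExtLst, pvScanFlag parmFileExtLst hruLvlFlExtLst)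

-- ===== PORT B =====
-- B's single loop: carry both flags; break as soon as both equal 1.
def pvLoopB (parm : List String) (sub : List String) (hru : List String) (fs fh : Int) : Int × Int :=
  match parm with
  | [] => (fs, fh)
  | x :: rest =>
    let fs' := if fs == 0 && sub.contains x then 1 else fs
    let fh' := if fh == 0 && hru.contains x then 1 else fh
    if fs' == 1 && fh' == 1 then (fs', fh') else pvLoopB rest sub hru fs' fh'

def determineFileLoopFlag_alt (parmFileExtLst : List String) (subLvlFlExtLst : List String) (hruLvlFlExtLst : List String) : Int × Int :=
  pvLoopB parmFileExtLst subLvlFlExtLst hruLvlFlExtLst 0 0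

-- ===== PRECONDITION & SPEC =====
def Spec_determineFileLoopFlag (parmFileExtLst : List String) (subLvlFlExtLst : List String) (hruLvlFlExtLst : List String) (out : Int × Int) : Prop := out = determineFileLoopFlag_alt parmFileExtLst subLvlFlExtLst hruLvlFlExtLst
instance (parmFileExtLst : List String) (subLvlFlExtLst : List String) (hruLvlFlExtLst : List String) (out : Int × Int) : Decidable (Spec_determineFileLoopFlag parmFileExtLst subLvlFlExtLst hruLvlFlExtLst out) := by unfold Spec_determineFileLoopFlag; infer_instance

-- ===== CLAIM (what is proved, stated in full; the proofs are below) =====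
def Claim_equal_determineFileLoopFlag : Prop := ∀ (parmFileExtLst : List String) (subLvlFlExtLst : List String) (hruLvlFlExtLst : List String), Dom_determineFileLoopFlag parmFileExtLst subLvlFlExtLst hruLvlFlExtLst → Spec_determineFileLoopFlag parmFileExtLst subLvlFlExtLst hruLvlFlExtLst (determineFileLoopFlag parmFileExtLst subLvlFlExtLst hruLvlFlExtLst)

-- ===== LEMMAS AND PROOFS =====
-- Loop invariant for B's single pass: with flags already 0 or 1, the loop returns, per
-- component, 1 if the incoming flag was already 1 and otherwise A's scan result.
theorem pvLoopB_invariant (parm sub hru : List String) :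
    ∀ fs fh : Int, (fs = 0 ∨ fs = 1) → (fh = 0 ∨ fh = 1) →
      pvLoopB parm sub hru fs fh =
        ((if fs = 1 then 1 else pvScanFlag parm sub),
         (if fh = 1 then 1 else pvScanFlag parm hru)) := by
  induction parm with
  | nil =>
    intro fs fh hfs hfh
    rcases hfs with rfl | rfl <;> rcases hfh with rfl | rfl <;> simp [pvLoopB, pvScanFlag]
  | cons x rest ih =>
    intro fs fh hfs hfh
    rcases hfs with rfl | rfl <;> rcases hfh with rfl | rfl <;>
      simp only [pvLoopB, pvScanFlag] <;>
      by_cases hs : x ∈ sub <;> by_cases hh : x ∈ hru <;>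
      simp [hs, hh, ih 0 0 (Or.inl rfl) (Or.inl rfl), ih 0 1 (Or.inl rfl) (Or.inr rfl),
            ih 1 0 (Or.inr rfl) (Or.inl rfl)]

-- ===== VERDICT (by name: the statement is the Claim_ definition above) =====
theorem determineFileLoopFlag_spec : Claim_equal_determineFileLoopFlag := by
  intro parm sub hru _
  unfold Spec_determineFileLoopFlag determineFileLoopFlag determineFileLoopFlag_alt
  rw [pvLoopB_invariant parm sub hru 0 0 (Or.inl rfl) (Or.inl rfl)]
  simp
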